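-- pv_equiv track=rewrite | github.com/Chenhu7/ISAtools | src/gtf_rescue_filtering.py | find_nearest_exon
-- ===== SOURCE A (Python) =====
-- import bisect
--
-- def find_nearest_exon(ref_sites, query_sites):
--     mapped_sites = []
--     for q in query_sites:
--         idx = bisect.bisect_left(ref_sites, q)
--
--         if idx == 0:
--             mapped_sites.append(ref_sites[0])
--         elif idx == len(ref_sites):
--             mapped_sites.append(ref_sites[-1])
--         else:
--             before = ref_sites[idx - 1]
--             after = ref_sites[idx]
--             mapped_sites.append(before if abs(q - before) <= abs(q - after) else after)
--
--     return mapped_sites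
-- ===== SOURCE B (Python) =====
-- def find_nearest_exon(ref_sites, query_sites):
--     def search(lo, hi, q):
--         if lo >= hi:
--             return lo
--         mid = (lo + hi) // 2
--         if ref_sites[mid] < q:
--             return search(mid + 1, hi, q)
--         return search(lo, mid, q)
--
--     mapped_sites = []
--     for q in query_sites:
--         i = search(0, len(ref_sites), q)
--         window = ref_sites[max(i - 1, 0):i + 1]
--         mapped_sites.append(min(window, key=lambda r: abs(r - q)))
--     return mapped_sites
-- ===== Notes on version B (the rewrite author's own statement) =====
-- stated objective: alternative
-- what changed: Replaces the bisect library call by a hand-rolled recursive binary search and replaces A's three-way boundary/neighbour branch by a uniform min-by-distance over the candidate window ref_sites[max(i-1,0):i+1].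
import Mathlib
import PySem

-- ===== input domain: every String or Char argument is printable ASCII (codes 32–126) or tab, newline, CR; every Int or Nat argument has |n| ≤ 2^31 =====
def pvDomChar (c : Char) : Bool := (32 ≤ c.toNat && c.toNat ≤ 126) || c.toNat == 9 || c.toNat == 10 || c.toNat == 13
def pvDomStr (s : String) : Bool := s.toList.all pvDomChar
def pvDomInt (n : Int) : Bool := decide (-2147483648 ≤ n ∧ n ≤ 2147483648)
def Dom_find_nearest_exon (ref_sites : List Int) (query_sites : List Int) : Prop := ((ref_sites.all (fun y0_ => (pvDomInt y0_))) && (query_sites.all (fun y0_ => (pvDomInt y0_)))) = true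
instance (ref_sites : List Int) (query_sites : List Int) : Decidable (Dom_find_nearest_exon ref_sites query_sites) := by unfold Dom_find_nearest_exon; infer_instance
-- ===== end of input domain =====

-- B swaps the bisect library call for a hand-rolled recursive binary search and the three-way
-- boundary/neighbour branch for a uniform min-by-distance over the window ref[max(i-1,0):i+1]
-- (objective: alternative decomposition, same cost).

-- ===== PORT A =====
-- port of bisect.bisect_left(a, x): lo/hi are Python's default 0 / len(a);
-- a[mid] always has lo ≤ mid < hi ≤ len a, so List.getD is exact here
def pvBisectLeft (a : List Int) (x : Int) (lo hi : Nat) : Nat :=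
  if lo < hi then
    let mid := (lo + hi) / 2
    if a.getD mid 0 < x then pvBisectLeft a x (mid + 1) hi
    else pvBisectLeft a x lo mid
  else lo
termination_by hi - lo
decreasing_by all_goals omega

-- the loop body of A: the value appended for one query site q
def pvNearestA (ref_sites : List Int) (q : Int) : Int :=
  let idx := pvBisectLeft ref_sites q 0 ref_sites.length
  if idx = 0 then (PySem.List.pyGet? ref_sites 0).getD 0
  else if idx = ref_sites.length then (PySem.List.pyGet? ref_sites (-1)).getD 0
  else
    let before := (PySem.List.pyGet? ref_sites ((idx : Int) - 1)).getD 0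
    let after := (PySem.List.pyGet? ref_sites (idx : Int)).getD 0
    if |q - before| ≤ |q - after| then before else after

def find_nearest_exon (ref_sites : List Int) (query_sites : List Int) : List Int :=
  query_sites.foldl (fun mapped_sites q => mapped_sites ++ [pvNearestA ref_sites q]) []

-- ===== PORT B =====
-- B's inner helper 'search(lo, hi, q)': recursive binary search; ref_sites[mid] is always in
-- range (lo ≤ mid < hi ≤ len), so List.getD is exact here
def pvSearch (ref_sites : List Int) (q : Int) (lo hi : Nat) : Nat :=
  if lo ≥ hi then lo
  else
    let mid := (lo + hi) / 2
    if ref_sites.getD mid 0 < q then pvSearch ref_sites q (mid + 1) hi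
    else pvSearch ref_sites q lo mid
termination_by hi - lo
decreasing_by all_goals omega

-- the loop body of B: min(window, key=lambda r: abs(r - q)); on an empty ref_sites the window
-- is empty and Python's min raises ValueError (outside Pre_), here min? is none and .getD 0
-- is never the returned value under Pre_
def pvNearestB (ref_sites : List Int) (q : Int) : Int :=
  let i := pvSearch ref_sites q 0 ref_sites.length
  let window := PySem.List.slice ref_sites (some (max ((i : Int) - 1) 0)) (some ((i : Int) + 1))
  (PySem.List.min? window (fun r => |r - q|)).getD 0

def find_nearest_exon_alt (ref_sites : List Int) (query_sites : List Int) : List Int :=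
  query_sites.foldl (fun mapped_sites q => mapped_sites ++ [pvNearestB ref_sites q]) []

-- ===== PRECONDITION & SPEC =====
-- Pre_ excludes only an empty ref_sites with nonempty query_sites, where both programs raise
-- (A IndexError from ref_sites[0], B ValueError from min([])).
def Pre_find_nearest_exon (ref_sites : List Int) (query_sites : List Int) : Prop :=
  ref_sites ≠ [] ∨ query_sites = []
instance (ref_sites : List Int) (query_sites : List Int) : Decidable (Pre_find_nearest_exon ref_sites query_sites) := by unfold Pre_find_nearest_exon; infer_instance

def pvWitness_find_nearest_exon : List Int × List Int := ([1, 5], [0, 3, 9])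

def Spec_find_nearest_exon (ref_sites : List Int) (query_sites : List Int) (out : List Int) : Prop := out = find_nearest_exon_alt ref_sites query_sites
instance (ref_sites : List Int) (query_sites : List Int) (out : List Int) : Decidable (Spec_find_nearest_exon ref_sites query_sites out) := by unfold Spec_find_nearest_exon; infer_instance

-- ===== CLAIM (what is proved, stated in full; the proofs are below) =====
def Claim_equal_find_nearest_exon : Prop := ∀ (ref_sites : List Int) (query_sites : List Int), Dom_find_nearest_exon ref_sites query_sites → Pre_find_nearest_exon ref_sites query_sites → Spec_find_nearest_exon ref_sites query_sites (find_nearest_exon ref_sites query_sites)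

-- ===== LEMMAS AND PROOFS =====

-- B's recursive search computes the same index as A's bisect_left, on every list
lemma pv_search_eq_bisect (a : List Int) (x : Int) (lo hi : Nat) :
    pvSearch a x lo hi = pvBisectLeft a x lo hi := by
  fun_induction pvBisectLeft a x lo hi with
  | case1 lo hi hlh mid hm ih =>
    rw [pvSearch, if_neg (by omega)]
    simp only
    rw [if_pos hm]
    exact ih
  | case2 lo hi hlh mid hm ih =>
    rw [pvSearch, if_neg (by omega)]
    simp only
    rw [if_neg hm]
    exact ih
  | case3 lo hi hlh =>
    rw [pvSearch, if_pos (by omega)]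

-- bisect_left's result never exceeds hi (no sortedness needed)
lemma pv_bisect_le (a : List Int) (x : Int) (lo hi : Nat) (h : lo ≤ hi) :
    pvBisectLeft a x lo hi ≤ hi := by
  fun_induction pvBisectLeft a x lo hi with
  | case1 lo hi hlh mid hm ih => exact ih (by omega)
  | case2 lo hi hlh mid hm ih => exact le_trans (ih (by omega)) (by omega)
  | case3 lo hi hlh => omega

lemma pv_pyGet_zero (l : List Int) (h : l ≠ []) :
    PySem.List.pyGet? l 0 = some (l.getD 0 0) := by
  have hl : 0 < l.length := List.length_pos_iff.mpr h
  simp [PySem.List.pyGet?, PySem.List.pyIdx?, hl, List.getD_eq_getElem?_getD]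

lemma pv_pyGet_neg_one (l : List Int) (h : l ≠ []) :
    PySem.List.pyGet? l (-1) = some (l.getD (l.length - 1) 0) := by
  have hl : 0 < l.length := List.length_pos_iff.mpr h
  have h1 : (-(l.length : Int) ≤ -1) := by omega
  have h2 : l.length - 1 < l.length := by omega
  simp [PySem.List.pyGet?, PySem.List.pyIdx?, h1, List.getD_eq_getElem?_getD,
    List.getElem?_eq_getElem h2]

lemma pv_pyGet_nat (l : List Int) (n : Nat) (h : n < l.length) :
    PySem.List.pyGet? l (n : Int) = some (l.getD n 0) := by
  rw [PySem.List.pyGet?_natCast, List.getD_eq_getElem?_getD, List.getElem?_eq_getElem h]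
  rfl

-- the drop/take window [max(i-1,0), i+1) as an explicit list, in each of the three regimes
lemma pv_window_zero (l : List Int) (h : l ≠ []) :
    PySem.List.slice l (some (max ((0 : Nat) - 1 : Int) 0)) (some ((0 : Nat) + 1 : Int)) =
      [l.getD 0 0] := by
  have h0 : (max ((0 : Nat) - 1 : Int) 0) = ((0 : Nat) : Int) := by omega
  have h1 : ((0 : Nat) + 1 : Int) = ((1 : Nat) : Int) := by omega
  rw [h0, h1, PySem.List.slice_natCast]
  cases l with
  | nil => exact absurd rfl h
  | cons a t => simp

lemma pv_window_mid (l : List Int) (k : Nat) (hk : k + 1 < l.length) :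
    PySem.List.slice l (some (max ((k + 1 : Nat) - 1 : Int) 0)) (some ((k + 1 : Nat) + 1 : Int)) =
      [l.getD k 0, l.getD (k + 1) 0] := by
  have h0 : (max ((k + 1 : Nat) - 1 : Int) 0) = ((k : Nat) : Int) := by omega
  have h1 : ((k + 1 : Nat) + 1 : Int) = ((k + 2 : Nat) : Int) := by omega
  have hd : l.drop k = l[k] :: l[k + 1] :: l.drop (k + 2) := by
    rw [List.drop_eq_getElem_cons (by omega), List.drop_eq_getElem_cons hk]
  rw [h0, h1, PySem.List.slice_natCast, show k + 2 - k = 2 by omega, hd,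
    List.getD_eq_getElem l 0 (show k < l.length by omega), List.getD_eq_getElem l 0 hk]
  rfl

lemma pv_window_end (l : List Int) (h : l ≠ []) :
    PySem.List.slice l (some (max ((l.length : Nat) - 1 : Int) 0)) (some ((l.length : Nat) + 1 : Int)) =
      [l.getD (l.length - 1) 0] := by
  have hl : 0 < l.length := List.length_pos_iff.mpr h
  have h0 : (max ((l.length : Nat) - 1 : Int) 0) = ((l.length - 1 : Nat) : Int) := by omega
  have h1 : ((l.length : Nat) + 1 : Int) = ((l.length + 1 : Nat) : Int) := by omega
  rw [h0, h1, PySem.List.slice_natCast, show l.length + 1 - (l.length - 1) = 2 by omega,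
    List.drop_eq_getElem_cons (show l.length - 1 < l.length by omega),
    show l.length - 1 + 1 = l.length by omega, List.drop_length,
    List.getD_eq_getElem l 0 (show l.length - 1 < l.length by omega)]
  rfl

lemma pv_min_singleton (q b : Int) :
    (PySem.List.min? [b] (fun r => |r - q|)).getD 0 = b := rfl

lemma pv_min_pair (q b c : Int) :
    (PySem.List.min? [b, c] (fun r => |r - q|)).getD 0 =
      if |c - q| < |b - q| then c else b := by
  show (List.foldl _ none [b, c]).getD 0 = _
  simp only [List.foldl_cons, List.foldl_nil]
  show (if |c - q| < |b - q| then some c else some b).getD 0 = _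
  split_ifs <;> rfl

-- the per-query values agree on every nonempty reference list (sorted or not)
lemma pv_nearest_eq (ref : List Int) (hne : ref ≠ []) (q : Int) :
    pvNearestA ref q = pvNearestB ref q := by
  have hlen : 0 < ref.length := List.length_pos_iff.mpr hne
  have hle : pvBisectLeft ref q 0 ref.length ≤ ref.length :=
    pv_bisect_le ref q 0 ref.length (Nat.zero_le _)
  simp only [pvNearestA, pvNearestB, pv_search_eq_bisect]
  generalize hgen : pvBisectLeft ref q 0 ref.length = idx at hle ⊢
  by_cases h0 : idx = 0
  · subst h0
    rw [if_pos rfl, pv_pyGet_zero ref hne, Option.getD_some, pv_window_zero ref hne,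
      pv_min_singleton]
  · obtain ⟨k, rfl⟩ : ∃ k, idx = k + 1 := ⟨idx - 1, by omega⟩
    rw [if_neg h0]
    by_cases hN : k + 1 = ref.length
    · rw [if_pos hN, pv_pyGet_neg_one ref hne, Option.getD_some]
      rw [show (k + 1 : Nat) = ref.length from hN, pv_window_end ref hne, pv_min_singleton]
    · have hk : k + 1 < ref.length := by omega
      rw [if_neg hN, pv_window_mid ref k hk, pv_min_pair,
        show ((k + 1 : Nat) : Int) - 1 = ((k : Nat) : Int) by omega,
        pv_pyGet_nat ref k (by omega), pv_pyGet_nat ref (k + 1) hk,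
        Option.getD_some, Option.getD_some]
      have hcomm : |q - ref.getD k 0| = |ref.getD k 0 - q| := abs_sub_comm _ _
      have hcomm' : |q - ref.getD (k + 1) 0| = |ref.getD (k + 1) 0 - q| := abs_sub_comm _ _
      by_cases hc : |q - ref.getD k 0| ≤ |q - ref.getD (k + 1) 0|
      · rw [if_pos hc, if_neg (by rw [← hcomm, ← hcomm']; exact not_lt.mpr hc)]
      · rw [if_neg hc, if_pos (by rw [← hcomm, ← hcomm']; exact not_le.mp hc)]

-- both loops append one value per query: rewrite each as a map over query_sites
lemma pv_foldl_append_map (f : Int → Int) (l : List Int) (acc : List Int) :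
    l.foldl (fun m q => m ++ [f q]) acc = acc ++ l.map f := by
  induction l generalizing acc with
  | nil => simp
  | cons b t ih => simp [ih]

-- ===== VERDICT (by name: the statement is the Claim_ definition above) =====
theorem find_nearest_exon_spec : Claim_equal_find_nearest_exon := by
  intro ref qs _ hpre
  unfold Spec_find_nearest_exon find_nearest_exon find_nearest_exon_alt
  rw [pv_foldl_append_map, pv_foldl_append_map, List.nil_append, List.nil_append]
  rcases hpre with hne | rfl
  · exact List.map_congr_left (fun q _ => pv_nearest_eq ref hne q)
  · simp
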